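-- pv_equiv track=rewrite | github.com/dsteinberger/smartsplit | smartsplit/proxy/pipeline.py | _truncate_messages
-- ===== SOURCE A (Python) =====
-- def _truncate_messages(messages: list[dict[str, str]], max_chars: int) -> list[dict[str, str]]:
--     """Truncate conversation to fit within max_chars.
--
--     Keeps system messages + most recent messages, drops old messages from the middle.
--     """
--     system = [m for m in messages if m["role"] == "system"]
--     non_system = [m for m in messages if m["role"] != "system"]
--
--     budget = max_chars - sum(len(m["content"]) for m in system)
--     kept: list[dict[str, str]] = []
--     for m in reversed(non_system):
--         if budget - len(m["content"]) < 0: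
--             break
--         kept.append(m)
--         budget -= len(m["content"])
--     kept.reverse()
--
--     # Always keep at least the last user message (truncated if needed)
--     if not kept and non_system:
--         last = non_system[-1]
--         kept = [{"role": last["role"], "content": last["content"][: max(budget, 200)]}]
--
--     return system + kept
-- ===== SOURCE B (Python) =====
-- def _truncate_messages(messages: list[dict[str, str]], max_chars: int) -> list[dict[str, str]]:
--     """Truncate conversation to fit within max_chars.
--
--     Same result as A, computed differently: one pass partitions the messages and
--     totals the system content; a suffix-sum table over the non-system messages is
--     then filled from the back, and the kept tail is rest[cut:] where cut is the
--     first index whose suffix sum fits the budget.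
--     """
--     system, rest, sys_len = [], [], 0
--     for m in messages:
--         if m["role"] == "system":
--             system.append(m)
--             sys_len += len(m["content"])
--         else:
--             rest.append(m)
--     budget = max_chars - sys_len
--
--     n = len(rest)
--     suffix = [0] * (n + 1)
--     for i in range(n - 1, -1, -1):
--         suffix[i] = suffix[i + 1] + len(rest[i]["content"])
--     cut = next((i for i, s in enumerate(suffix) if s <= budget), n + 1)
--     kept = rest[cut:]
--
--     # Always keep at least the last user message (truncated if needed)
--     if not kept and rest:
--         last = rest[-1]
--         return system + [{"role": last["role"], "content": last["content"][: max(budget, 200)]}]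
--     return system + kept
-- ===== Notes on version B (the rewrite author's own statement) =====
-- stated objective: alternative
-- what changed: Replaces A's reverse-accumulate-until-break loop by a single partition pass that also totals the system content, a suffix-sum table over the non-system messages filled from the back, and a forward search for the first index whose suffix sum fits the budget; kept = rest[cut:].
import Mathlib
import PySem

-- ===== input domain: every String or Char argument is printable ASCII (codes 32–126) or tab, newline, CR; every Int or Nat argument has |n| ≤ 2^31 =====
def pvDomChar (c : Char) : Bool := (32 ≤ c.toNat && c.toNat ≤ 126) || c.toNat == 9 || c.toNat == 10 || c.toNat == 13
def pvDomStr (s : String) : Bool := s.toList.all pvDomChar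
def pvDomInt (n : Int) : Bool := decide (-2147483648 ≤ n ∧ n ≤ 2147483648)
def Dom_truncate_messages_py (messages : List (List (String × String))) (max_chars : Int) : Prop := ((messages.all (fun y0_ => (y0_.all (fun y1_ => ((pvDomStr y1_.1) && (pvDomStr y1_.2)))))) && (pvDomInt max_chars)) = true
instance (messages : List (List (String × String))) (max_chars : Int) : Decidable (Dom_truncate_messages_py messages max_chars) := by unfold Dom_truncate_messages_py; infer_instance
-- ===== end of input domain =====

-- B replaces A's reverse accumulate-until-break loop with one partition pass plus a
-- suffix-sum table and a forward search for the first suffix that fits (alternative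
-- decomposition, same cost).

-- string equality via code points (kernel-evaluable; exact for Python's ==)
def pvStrEq (a b : String) : Bool := a.toList == b.toList

-- m[k] for a dict (association list, first match); Pre_ guarantees the key is present
def pvGet (m : List (String × String)) (k : String) : String :=
  ((m.find? (fun p => pvStrEq p.1 k)).map (fun p => p.2)).getD ""

-- ===== PORT A =====
-- the 'for m in reversed(non_system): if … break; kept.append(m); budget -= …' loop
def pvALoop : List (List (String × String)) → List (List (String × String)) → Int → (List (List (String × String)) × Int)
  | [], kept, budget => (kept, budget)
  | m :: rest, kept, budget =>
    if budget - PySem.Str.len (pvGet m "content") < 0 then (kept, budget)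
    else pvALoop rest (kept ++ [m]) (budget - PySem.Str.len (pvGet m "content"))

def truncate_messages_py (messages : List (List (String × String))) (max_chars : Int) : List (List (String × String)) :=
  let system := messages.filter (fun m => pvStrEq (pvGet m "role") "system")
  let non_system := messages.filter (fun m => !(pvStrEq (pvGet m "role") "system"))
  let budget := max_chars - (system.map (fun m => PySem.Str.len (pvGet m "content"))).sum
  let res := pvALoop non_system.reverse [] budget
  let kept := res.1.reverse
  let kept :=
    if kept = [] ∧ non_system ≠ [] then
      match non_system.getLast? with
      | some last => [[("role", pvGet last "role"),
                       ("content", PySem.Str.slice (pvGet last "content") none (some (max res.2 200)))]]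
      | none => kept
    else kept
  system ++ kept

-- ===== PORT B =====
-- one pass 'for m in messages: …' building system, rest and sys_len together
def pvBStep (acc : List (List (String × String)) × List (List (String × String)) × Int)
    (m : List (String × String)) :
    List (List (String × String)) × List (List (String × String)) × Int :=
  if pvStrEq (pvGet m "role") "system" then
    (acc.1 ++ [m], acc.2.1, acc.2.2 + PySem.Str.len (pvGet m "content"))
  else (acc.1, acc.2.1 ++ [m], acc.2.2)

-- 'suffix[i] = suffix[i+1] + len(rest[i]["content"])', the table filled from the back
def pvSuffixTable : List (List (String × String)) → List Int
  | [] => [0]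
  | m :: r => (PySem.Str.len (pvGet m "content") + (pvSuffixTable r).headD 0) :: pvSuffixTable r

def truncate_messages_py_alt (messages : List (List (String × String))) (max_chars : Int) : List (List (String × String)) :=
  let acc := messages.foldl pvBStep ([], [], 0)
  let system := acc.1
  let rest := acc.2.1
  let budget := max_chars - acc.2.2
  let cut := (pvSuffixTable rest).findIdx (fun v => v ≤ budget)
  let kept := rest.drop cut
  if kept.isEmpty && !rest.isEmpty then
    match rest.getLast? with
    | some last => system ++ [[("role", pvGet last "role"),
        ("content", PySem.Str.slice (pvGet last "content") none (some (max budget 200)))]]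
    | none => system ++ kept
  else system ++ kept

-- ===== PRECONDITION & SPEC =====
-- Pre_ excludes messages missing a "role" or "content" key: Python raises KeyError on them
-- (except that A returns when a keyless non-system message is never reached by its loop — see claim cites).
def Pre_truncate_messages_py (messages : List (List (String × String))) (max_chars : Int) : Prop :=
  messages.all (fun m => (m.any (fun p => pvStrEq p.1 "role")) && (m.any (fun p => pvStrEq p.1 "content"))) = true
instance (messages : List (List (String × String))) (max_chars : Int) : Decidable (Pre_truncate_messages_py messages max_chars) := by unfold Pre_truncate_messages_py; infer_instance

def pvWitness_truncate_messages_py : (List (List (String × String))) × Int :=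
  ([[("role", "system"), ("content", "be nice")], [("role", "user"), ("content", "hi")]], 20)

def Spec_truncate_messages_py (messages : List (List (String × String))) (max_chars : Int) (out : List (List (String × String))) : Prop := out = truncate_messages_py_alt messages max_chars
instance (messages : List (List (String × String))) (max_chars : Int) (out : List (List (String × String))) : Decidable (Spec_truncate_messages_py messages max_chars out) := by unfold Spec_truncate_messages_py; infer_instance

-- ===== CLAIM (what is proved, stated in full; the proofs are below) =====
def Claim_equal_truncate_messages_py : Prop := ∀ (messages : List (List (String × String))) (max_chars : Int), Dom_truncate_messages_py messages max_chars → Pre_truncate_messages_py messages max_chars → Spec_truncate_messages_py messages max_chars (truncate_messages_py messages max_chars)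

-- ===== LEMMAS AND PROOFS =====

-- content length of a message
def pvClen (m : List (String × String)) : Int := PySem.Str.len (pvGet m "content")

def pvSumLen (l : List (List (String × String))) : Int := (l.map pvClen).sum

def pvIsSys (m : List (String × String)) : Bool := pvStrEq (pvGet m "role") "system"

-- A's loop, as structural recursion on the reversed list (proof-side characterisation)
def pvKeepRev : List (List (String × String)) → Int → List (List (String × String))
  | [], _ => []
  | m :: r, b => if b - pvClen m < 0 then [] else m :: pvKeepRev r (b - pvClen m)

-- common characterisation: the kept tail is the first suffix whose total fits
def pvCanon : List (List (String × String)) → Int → List (List (String × String))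
  | [], _ => []
  | m :: r, b => if pvSumLen (m :: r) ≤ b then m :: r else pvCanon r b

theorem pvClen_nonneg (m : List (String × String)) : 0 ≤ pvClen m := by
  simp [pvClen, PySem.Str.len_eq]

theorem pvSumLen_nonneg (l : List (List (String × String))) : 0 ≤ pvSumLen l := by
  induction l with
  | nil => simp [pvSumLen]
  | cons m r ih =>
    have := pvClen_nonneg m
    simp only [pvSumLen, List.map_cons, List.sum_cons] at *
    omega

theorem pvSumLen_cons (m : List (String × String)) (l : List (List (String × String))) :
    pvSumLen (m :: l) = pvClen m + pvSumLen l := by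
  simp [pvSumLen]

theorem pvSumLen_append_one (l : List (List (String × String))) (m : List (String × String)) :
    pvSumLen (l ++ [m]) = pvSumLen l + pvClen m := by
  simp [pvSumLen]

theorem pvALoop_eq (l : List (List (String × String))) :
    ∀ kept b, pvALoop l kept b = (kept ++ pvKeepRev l b, b - pvSumLen (pvKeepRev l b)) := by
  induction l with
  | nil => intro kept b; simp [pvALoop, pvKeepRev, pvSumLen]
  | cons m r ih =>
    intro kept b
    simp only [pvALoop, pvKeepRev,
      show PySem.Str.len (pvGet m "content") = pvClen m from rfl]
    by_cases h : b - pvClen m < 0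
    · simp [h, pvSumLen]
    · rw [if_neg h, if_neg h, ih]
      rw [Prod.mk.injEq]
      refine ⟨by simp, ?_⟩
      rw [pvSumLen_cons]
      ring_nf

-- A-side: pvCanon over zs ++ [y]
theorem pvCanon_append (y : List (String × String)) (zs : List (List (String × String))) :
    ∀ b, pvCanon (zs ++ [y]) b =
      if b - pvClen y < 0 then []
      else pvCanon zs (b - pvClen y) ++ [y] := by
  induction zs with
  | nil =>
    intro b
    have h1 : pvSumLen ([y]) = pvClen y := by simp [pvSumLen]
    by_cases h : b - pvClen y < 0
    · rw [if_pos h]; simp only [List.nil_append, pvCanon, h1]; rw [if_neg (by omega)]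
    · rw [if_neg h]; simp only [List.nil_append, pvCanon, h1]; rw [if_pos (by omega)]
  | cons z zs' ih =>
    intro b
    have hsum : pvSumLen ((z :: zs') ++ [y]) = pvClen z + pvSumLen (zs' ++ [y]) := by
      rw [List.cons_append, pvSumLen_cons]
    have hsum2 : pvSumLen (zs' ++ [y]) = pvSumLen zs' + pvClen y := pvSumLen_append_one zs' y
    have hz := pvClen_nonneg z
    have hzs := pvSumLen_nonneg zs'
    have hy := pvClen_nonneg y
    by_cases hm : b - pvClen y < 0
    · rw [if_pos hm, List.cons_append, pvCanon, if_neg (by rw [← List.cons_append, hsum]; omega)]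
      have := ih b
      rwa [if_pos hm] at this
    · rw [if_neg hm]
      by_cases hall : pvSumLen ((z :: zs') ++ [y]) ≤ b
      · rw [List.cons_append, pvCanon, if_pos (by rw [← List.cons_append]; exact hall)]
        rw [pvCanon, if_pos (by rw [hsum, hsum2] at hall; rw [pvSumLen_cons]; omega)]
        rw [List.cons_append]
      · rw [List.cons_append, pvCanon, if_neg (by rw [← List.cons_append]; exact hall)]
        rw [pvCanon, if_neg (by rw [hsum, hsum2] at hall; rw [pvSumLen_cons]; omega)]
        have := ih b
        rwa [if_neg hm] at this

-- A's kept suffix equals the canonical first-fitting suffix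
theorem pvKeepRev_eq_canon (xs : List (List (String × String))) :
    ∀ b, (pvKeepRev xs b).reverse = pvCanon xs.reverse b := by
  induction xs with
  | nil => intro b; simp [pvKeepRev, pvCanon]
  | cons m r ih =>
    intro b
    simp only [List.reverse_cons]
    rw [pvCanon_append]
    by_cases h : b - pvClen m < 0
    · simp [pvKeepRev, h]
    · simp only [pvKeepRev, if_neg h, List.reverse_cons]
      rw [ih (b - pvClen m)]

-- B-side: the suffix table's head is the total, each entry the sum of the tail it indexes
theorem pvSuffixTable_head (l : List (List (String × String))) :
    (pvSuffixTable l).headD 0 = pvSumLen l := by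
  induction l with
  | nil => simp [pvSuffixTable, pvSumLen]
  | cons m r ih =>
    simp only [pvSuffixTable, List.headD_cons, ih, pvSumLen_cons]
    rfl

-- B's drop-at-first-fitting-index equals the canonical suffix
theorem pvCut_eq_canon (l : List (List (String × String))) :
    ∀ b, l.drop ((pvSuffixTable l).findIdx (fun v => v ≤ b)) = pvCanon l b := by
  induction l with
  | nil =>
    intro b
    by_cases h : (0 : Int) ≤ b <;> simp [pvSuffixTable, pvCanon, List.findIdx, List.findIdx.go, h]
  | cons m r ih =>
    intro b
    have hhead : PySem.Str.len (pvGet m "content") + (pvSuffixTable r).headD 0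
        = pvSumLen (m :: r) := by
      rw [pvSuffixTable_head, pvSumLen_cons]; rfl
    simp only [pvSuffixTable, List.findIdx_cons, hhead]
    by_cases h : pvSumLen (m :: r) ≤ b
    · simp [h, pvCanon]
    · simp only [h, decide_false, cond_false, List.drop_succ_cons]
      rw [ih b]
      simp [pvCanon, h]

-- B's partition fold builds the two filters plus the system total
theorem pvFold_eq (l : List (List (String × String))) :
    ∀ s r t, l.foldl pvBStep (s, r, t) =
      (s ++ l.filter pvIsSys, r ++ l.filter (fun m => !pvIsSys m),
       t + pvSumLen (l.filter pvIsSys)) := by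
  induction l with
  | nil => intro s r t; simp [pvSumLen]
  | cons m l' ih =>
    intro s r t
    simp only [List.foldl_cons, pvBStep]
    by_cases h : pvIsSys m = true
    · rw [if_pos (by simpa [pvIsSys] using h), ih]
      simp [h, pvSumLen_cons, pvClen]
      ring_nf
    · rw [if_neg (by simpa [pvIsSys] using h), ih]
      simp [h]

-- ===== VERDICT (by name: the statement is the Claim_ definition above) =====
theorem truncate_messages_py_spec : Claim_equal_truncate_messages_py := by
  intro messages max_chars _ _
  unfold Spec_truncate_messages_py truncate_messages_py truncate_messages_py_alt
  simp only []
  rw [pvFold_eq]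
  simp only [List.nil_append, zero_add]
  have e1 : (fun m : List (String × String) => pvStrEq (pvGet m "role") "system") = pvIsSys := rfl
  have e2 : (fun m : List (String × String) => !(pvStrEq (pvGet m "role") "system"))
      = (fun m => !pvIsSys m) := rfl
  have e3 : (fun m : List (String × String) => PySem.Str.len (pvGet m "content")) = pvClen := rfl
  rw [e1, e2, e3]
  have e4 : (List.map pvClen (messages.filter pvIsSys)).sum
      = pvSumLen (messages.filter pvIsSys) := rfl
  rw [e4]
  set system := messages.filter pvIsSys with hsys
  set non_system := messages.filter (fun m => !pvIsSys m) with hns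
  set budget := max_chars - pvSumLen (messages.filter pvIsSys) with hb
  have hloop := pvALoop_eq non_system.reverse [] budget
  have hkept : (pvALoop non_system.reverse [] budget).1.reverse
      = non_system.drop ((pvSuffixTable non_system).findIdx (fun v => v ≤ budget)) := by
    rw [hloop]
    simp only [List.nil_append]
    have h1 := pvKeepRev_eq_canon non_system.reverse budget
    rw [List.reverse_reverse] at h1
    rw [h1, pvCut_eq_canon]
  rw [hkept]
  set kept := non_system.drop ((pvSuffixTable non_system).findIdx (fun v => v ≤ budget)) with hk
  by_cases hcase : kept = [] ∧ non_system ≠ []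
  · have hcaseb : (kept.isEmpty && !non_system.isEmpty) = true := by
      simp [hcase.1, hcase.2]
    have hkr : pvKeepRev non_system.reverse budget = [] := by
      have : (pvALoop non_system.reverse [] budget).1.reverse = [] := by
        rw [hkept]; exact hcase.1
      rw [hloop] at this; simpa using this
    have hb2 : (pvALoop non_system.reverse [] budget).2 = budget := by
      rw [hloop, hkr]; simp [pvSumLen]
    rw [if_pos hcase, hcaseb, if_pos rfl, hb2]
    cases hlast : non_system.getLast? with
    | none => simp [List.getLast?_eq_none_iff.mp hlast] at hcase
    | some last => simp
  · have hcaseb : ¬ ((kept.isEmpty && !non_system.isEmpty) = true) := by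
      simp only [Bool.and_eq_true, List.isEmpty_iff, Bool.not_eq_true', List.isEmpty_eq_false_iff]
      intro hc
      exact hcase ⟨hc.1, hc.2⟩
    rw [if_neg hcase, if_neg hcaseb]
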